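-- pv_equiv track=rewrite | github.com/kinseylong/CAM5 | IDR_distance_calc.py | reduce_alphabet
-- ===== SOURCE A (Python) =====
-- four = {"L": "A", "V": "A", "I": "A", "M": "A", "C": "A",
--         "A": "B", "G": "B", "S": "B", "T": "B", "P": "B",
--         "F": "C", "Y": "C", "W": "C",
--         "E": "D", "D": "D", "N": "D", "Q": "D", "K": "D", "R": "D", "H": "D"}
--
-- eight = {"L": "A", "V": "A", "I": "A", "M": "A", "C": "A",
--          "A": "B", "G": "B",
--          "S": "C", "T": "C",
--          "P": "D",
--          "F": "E", "Y": "E", "W": "E",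
--          "E": "F", "D": "F", "N": "F", "Q": "F",
--          "K": "G", "R": "G",
--          "H": "H"}
--
-- ten = {"L": "A", "V": "A", "I": "A", "M": "A",
--        "C": "B",
--        "A": "C",
--        "G": "D",
--        "S": "E", "T": "E",
--        "P": "F",
--        "F": "G", "Y": "G", "W": "G",
--        "E": "H", "D": "H", "N": "H", "Q": "H",
--        "K": "I", "R": "I",
--        "H": "J"}
--
-- twelve = {"L": "A", "V": "A", "I": "A", "M": "A",
--           "C": "B",
--           "A": "C",
--           "G": "D",
--           "S": "E", "T": "E",
--           "P": "F",
--           "F": "G", "Y": "G",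
--           "W": "H",
--           "E": "I", "Q": "I",
--           "D": "J", "N": "J",
--           "K": "K", "R": "K",
--           "H": "L"}
--
-- fifteen = {"L": "A", "V": "A", "I": "A", "M": "A",
--            "C": "B",
--            "A": "C",
--            "G": "D",
--            "S": "E",
--            "T": "F",
--            "P": "G",
--            "F": "H", "Y": "H",
--            "W": "I",
--            "E": "J",
--            "Q": "K",
--            "D": "L",
--            "N": "M",
--            "K": "N", "R": "N",
--            "H": "O"}
--
-- eighteen = {"L": "A", "M": "A",
--             "V": "B", "I": "B",
--             "C": "C",
--             "A": "D",
--             "G": "E",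
--             "S": "F",
--             "T": "G",
--             "P": "H",
--             "F": "I",
--             "Y": "J",
--             "W": "K",
--             "E": "L",
--             "D": "M",
--             "N": "N",
--             "Q": "O",
--             "K": "P",
--             "R": "Q",
--             "H": "R"}
--
-- def reduce_alphabet(sequence):
--     def translate(sequence, reduction_dict):
--         return ''.join([reduction_dict.get(res, res) for res in sequence])
--
--     reduced_seq_four = translate(sequence, four)
--     reduced_seq_eight = translate(sequence, eight)
--     reduced_seq_ten = translate(sequence, ten)
--     reduced_seq_twelve = translate(sequence, twelve)
--     reduced_seq_fifteen = translate(sequence, fifteen)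
--     reduced_seq_eighteen = translate(sequence, eighteen)
--
--     return reduced_seq_four, reduced_seq_eight, reduced_seq_ten, reduced_seq_twelve, reduced_seq_fifteen, reduced_seq_eighteen
-- ===== SOURCE B (Python) =====
-- # One combined residue -> 6-tuple table, single pass over the sequence (vs six scans in A).
-- _TABLE = {
--     'L': ('A', 'A', 'A', 'A', 'A', 'A'),
--     'V': ('A', 'A', 'A', 'A', 'A', 'B'),
--     'I': ('A', 'A', 'A', 'A', 'A', 'B'),
--     'M': ('A', 'A', 'A', 'A', 'A', 'A'),
--     'C': ('A', 'A', 'B', 'B', 'B', 'C'),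
--     'A': ('B', 'B', 'C', 'C', 'C', 'D'),
--     'G': ('B', 'B', 'D', 'D', 'D', 'E'),
--     'S': ('B', 'C', 'E', 'E', 'E', 'F'),
--     'T': ('B', 'C', 'E', 'E', 'F', 'G'),
--     'P': ('B', 'D', 'F', 'F', 'G', 'H'),
--     'F': ('C', 'E', 'G', 'G', 'H', 'I'),
--     'Y': ('C', 'E', 'G', 'G', 'H', 'J'),
--     'W': ('C', 'E', 'G', 'H', 'I', 'K'),
--     'E': ('D', 'F', 'H', 'I', 'J', 'L'),
--     'D': ('D', 'F', 'H', 'J', 'L', 'M'),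
--     'N': ('D', 'F', 'H', 'J', 'M', 'N'),
--     'Q': ('D', 'F', 'H', 'I', 'K', 'O'),
--     'K': ('D', 'G', 'I', 'K', 'N', 'P'),
--     'R': ('D', 'G', 'I', 'K', 'N', 'Q'),
--     'H': ('D', 'H', 'J', 'L', 'O', 'R'),
-- }
--
-- def reduce_alphabet(sequence):
--     outs = ([], [], [], [], [], [])
--     for res in sequence:
--         t = _TABLE.get(res, (res, res, res, res, res, res))
--         for lst, ch in zip(outs, t):
--             lst.append(ch)
--     return tuple(''.join(lst) for lst in outs)
-- ===== Notes on version B (the rewrite author's own statement) =====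
-- stated objective: alternative
-- what changed: Replaces six independent scans of the sequence (one per reduction dict) with a single precomputed residue-to-6-tuple table and one pass that appends each residue's six reduced letters to six accumulator lists, joined at the end.
import Mathlib
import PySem

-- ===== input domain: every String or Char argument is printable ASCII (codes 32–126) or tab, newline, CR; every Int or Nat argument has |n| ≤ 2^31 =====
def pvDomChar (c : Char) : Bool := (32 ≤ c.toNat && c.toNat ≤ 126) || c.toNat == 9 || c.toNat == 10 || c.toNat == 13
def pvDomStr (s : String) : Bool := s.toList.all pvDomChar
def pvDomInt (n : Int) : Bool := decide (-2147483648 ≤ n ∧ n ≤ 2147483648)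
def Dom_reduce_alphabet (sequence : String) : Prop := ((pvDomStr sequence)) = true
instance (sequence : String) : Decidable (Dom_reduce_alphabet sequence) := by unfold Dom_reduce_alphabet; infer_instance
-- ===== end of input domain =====

-- B replaces A's six independent scans of the sequence (one per reduction dict) by one
-- precomputed residue → 6-tuple table and a single pass with six accumulators (objective: alternative).

-- ===== PORT A =====
-- The six reduction dicts (values are single characters, ported as Char).
def pvfour : PySem.Dict Char Char := PySem.Dict.ofList [('L','A'), ('V','A'), ('I','A'), ('M','A'), ('C','A'), ('A','B'), ('G','B'), ('S','B'), ('T','B'), ('P','B'), ('F','C'), ('Y','C'), ('W','C'), ('E','D'), ('D','D'), ('N','D'), ('Q','D'), ('K','D'), ('R','D'), ('H','D')]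
def pveight : PySem.Dict Char Char := PySem.Dict.ofList [('L','A'), ('V','A'), ('I','A'), ('M','A'), ('C','A'), ('A','B'), ('G','B'), ('S','C'), ('T','C'), ('P','D'), ('F','E'), ('Y','E'), ('W','E'), ('E','F'), ('D','F'), ('N','F'), ('Q','F'), ('K','G'), ('R','G'), ('H','H')]
def pvten : PySem.Dict Char Char := PySem.Dict.ofList [('L','A'), ('V','A'), ('I','A'), ('M','A'), ('C','B'), ('A','C'), ('G','D'), ('S','E'), ('T','E'), ('P','F'), ('F','G'), ('Y','G'), ('W','G'), ('E','H'), ('D','H'), ('N','H'), ('Q','H'), ('K','I'), ('R','I'), ('H','J')]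
def pvtwelve : PySem.Dict Char Char := PySem.Dict.ofList [('L','A'), ('V','A'), ('I','A'), ('M','A'), ('C','B'), ('A','C'), ('G','D'), ('S','E'), ('T','E'), ('P','F'), ('F','G'), ('Y','G'), ('W','H'), ('E','I'), ('Q','I'), ('D','J'), ('N','J'), ('K','K'), ('R','K'), ('H','L')]
def pvfifteen : PySem.Dict Char Char := PySem.Dict.ofList [('L','A'), ('V','A'), ('I','A'), ('M','A'), ('C','B'), ('A','C'), ('G','D'), ('S','E'), ('T','F'), ('P','G'), ('F','H'), ('Y','H'), ('W','I'), ('E','J'), ('Q','K'), ('D','L'), ('N','M'), ('K','N'), ('R','N'), ('H','O')]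
def pveighteen : PySem.Dict Char Char := PySem.Dict.ofList [('L','A'), ('M','A'), ('V','B'), ('I','B'), ('C','C'), ('A','D'), ('G','E'), ('S','F'), ('T','G'), ('P','H'), ('F','I'), ('Y','J'), ('W','K'), ('E','L'), ('D','M'), ('N','N'), ('Q','O'), ('K','P'), ('R','Q'), ('H','R')]

-- ''.join([reduction_dict.get(res, res) for res in sequence])
-- (the joined pieces are single characters, so the join is String.ofList of the mapped list — exact)
def pvTranslate (cs : List Char) (d : PySem.Dict Char Char) : String :=
  String.ofList (cs.map (fun res => PySem.Dict.getD d res res))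

def reduce_alphabet (sequence : String) : String × String × String × String × String × String :=
  let reduced_seq_four := pvTranslate sequence.toList pvfour
  let reduced_seq_eight := pvTranslate sequence.toList pveight
  let reduced_seq_ten := pvTranslate sequence.toList pvten
  let reduced_seq_twelve := pvTranslate sequence.toList pvtwelve
  let reduced_seq_fifteen := pvTranslate sequence.toList pvfifteen
  let reduced_seq_eighteen := pvTranslate sequence.toList pveighteen
  (reduced_seq_four, reduced_seq_eight, reduced_seq_ten, reduced_seq_twelve,
   reduced_seq_fifteen, reduced_seq_eighteen)

-- ===== PORT B =====
-- _TABLE of Source B: each residue mapped to its (four, eight, ten, twelve, fifteen, eighteen) letters.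
def pvTable : PySem.Dict Char (Char × Char × Char × Char × Char × Char) :=
  PySem.Dict.ofList
    [('L', ('A', 'A', 'A', 'A', 'A', 'A')),
    ('V', ('A', 'A', 'A', 'A', 'A', 'B')),
    ('I', ('A', 'A', 'A', 'A', 'A', 'B')),
    ('M', ('A', 'A', 'A', 'A', 'A', 'A')),
    ('C', ('A', 'A', 'B', 'B', 'B', 'C')),
    ('A', ('B', 'B', 'C', 'C', 'C', 'D')),
    ('G', ('B', 'B', 'D', 'D', 'D', 'E')),
    ('S', ('B', 'C', 'E', 'E', 'E', 'F')),
    ('T', ('B', 'C', 'E', 'E', 'F', 'G')),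
    ('P', ('B', 'D', 'F', 'F', 'G', 'H')),
    ('F', ('C', 'E', 'G', 'G', 'H', 'I')),
    ('Y', ('C', 'E', 'G', 'G', 'H', 'J')),
    ('W', ('C', 'E', 'G', 'H', 'I', 'K')),
    ('E', ('D', 'F', 'H', 'I', 'J', 'L')),
    ('D', ('D', 'F', 'H', 'J', 'L', 'M')),
    ('N', ('D', 'F', 'H', 'J', 'M', 'N')),
    ('Q', ('D', 'F', 'H', 'I', 'K', 'O')),
    ('K', ('D', 'G', 'I', 'K', 'N', 'P')),
    ('R', ('D', 'G', 'I', 'K', 'N', 'Q')),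
    ('H', ('D', 'H', 'J', 'L', 'O', 'R'))]

-- the single loop of Source B: six accumulator lists, prepended to then reversed and joined at the end
def pvAltLoop : List Char → List Char → List Char → List Char → List Char → List Char → List Char →
    String × String × String × String × String × String
  | [], a1, a2, a3, a4, a5, a6 =>
      (String.ofList a1.reverse, String.ofList a2.reverse, String.ofList a3.reverse,
       String.ofList a4.reverse, String.ofList a5.reverse, String.ofList a6.reverse)
  | c :: rest, a1, a2, a3, a4, a5, a6 =>
      let t := PySem.Dict.getD pvTable c (c, c, c, c, c, c)
      pvAltLoop rest (t.1 :: a1) (t.2.1 :: a2) (t.2.2.1 :: a3)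
        (t.2.2.2.1 :: a4) (t.2.2.2.2.1 :: a5) (t.2.2.2.2.2 :: a6)

def reduce_alphabet_alt (sequence : String) : String × String × String × String × String × String :=
  pvAltLoop sequence.toList [] [] [] [] [] []

-- ===== PRECONDITION & SPEC =====
def Spec_reduce_alphabet (sequence : String) (out : String × String × String × String × String × String) : Prop := out = reduce_alphabet_alt sequence
instance (sequence : String) (out : String × String × String × String × String × String) : Decidable (Spec_reduce_alphabet sequence out) := by unfold Spec_reduce_alphabet; infer_instance

-- ===== CLAIM (what is proved, stated in full; the proofs are below) =====
def Claim_equal_reduce_alphabet : Prop := ∀ (sequence : String), Dom_reduce_alphabet sequence → Spec_reduce_alphabet sequence (reduce_alphabet sequence)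

-- ===== LEMMAS AND PROOFS =====

-- the combined table agrees, component by component, with the six dict lookups
theorem pvTable_eq (c : Char) :
    PySem.Dict.getD pvTable c (c, c, c, c, c, c) =
      (PySem.Dict.getD pvfour c c, PySem.Dict.getD pveight c c, PySem.Dict.getD pvten c c,
       PySem.Dict.getD pvtwelve c c, PySem.Dict.getD pvfifteen c c, PySem.Dict.getD pveighteen c c) := by
  by_cases h1 : c = 'L'
  · subst h1; decide
  by_cases h2 : c = 'V'
  · subst h2; decide
  by_cases h3 : c = 'I'
  · subst h3; decide
  by_cases h4 : c = 'M'
  · subst h4; decide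
  by_cases h5 : c = 'C'
  · subst h5; decide
  by_cases h6 : c = 'A'
  · subst h6; decide
  by_cases h7 : c = 'G'
  · subst h7; decide
  by_cases h8 : c = 'S'
  · subst h8; decide
  by_cases h9 : c = 'T'
  · subst h9; decide
  by_cases h10 : c = 'P'
  · subst h10; decide
  by_cases h11 : c = 'F'
  · subst h11; decide
  by_cases h12 : c = 'Y'
  · subst h12; decide
  by_cases h13 : c = 'W'
  · subst h13; decide
  by_cases h14 : c = 'E'
  · subst h14; decide
  by_cases h15 : c = 'D'
  · subst h15; decide
  by_cases h16 : c = 'N'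
  · subst h16; decide
  by_cases h17 : c = 'Q'
  · subst h17; decide
  by_cases h18 : c = 'K'
  · subst h18; decide
  by_cases h19 : c = 'R'
  · subst h19; decide
  by_cases h20 : c = 'H'
  · subst h20; decide
  have t0 : pvTable = PySem.Dict.mk
    [('L', ('A', 'A', 'A', 'A', 'A', 'A')),
      ('V', ('A', 'A', 'A', 'A', 'A', 'B')),
      ('I', ('A', 'A', 'A', 'A', 'A', 'B')),
      ('M', ('A', 'A', 'A', 'A', 'A', 'A')),
      ('C', ('A', 'A', 'B', 'B', 'B', 'C')),
      ('A', ('B', 'B', 'C', 'C', 'C', 'D')),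
      ('G', ('B', 'B', 'D', 'D', 'D', 'E')),
      ('S', ('B', 'C', 'E', 'E', 'E', 'F')),
      ('T', ('B', 'C', 'E', 'E', 'F', 'G')),
      ('P', ('B', 'D', 'F', 'F', 'G', 'H')),
      ('F', ('C', 'E', 'G', 'G', 'H', 'I')),
      ('Y', ('C', 'E', 'G', 'G', 'H', 'J')),
      ('W', ('C', 'E', 'G', 'H', 'I', 'K')),
      ('E', ('D', 'F', 'H', 'I', 'J', 'L')),
      ('D', ('D', 'F', 'H', 'J', 'L', 'M')),
      ('N', ('D', 'F', 'H', 'J', 'M', 'N')),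
      ('Q', ('D', 'F', 'H', 'I', 'K', 'O')),
      ('K', ('D', 'G', 'I', 'K', 'N', 'P')),
      ('R', ('D', 'G', 'I', 'K', 'N', 'Q')),
      ('H', ('D', 'H', 'J', 'L', 'O', 'R'))] := by decide
  have u0 : pvfour = PySem.Dict.mk [('L','A'), ('V','A'), ('I','A'), ('M','A'), ('C','A'), ('A','B'), ('G','B'), ('S','B'), ('T','B'), ('P','B'), ('F','C'), ('Y','C'), ('W','C'), ('E','D'), ('D','D'), ('N','D'), ('Q','D'), ('K','D'), ('R','D'), ('H','D')] := by decide
  have u1 : pveight = PySem.Dict.mk [('L','A'), ('V','A'), ('I','A'), ('M','A'), ('C','A'), ('A','B'), ('G','B'), ('S','C'), ('T','C'), ('P','D'), ('F','E'), ('Y','E'), ('W','E'), ('E','F'), ('D','F'), ('N','F'), ('Q','F'), ('K','G'), ('R','G'), ('H','H')] := by decide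
  have u2 : pvten = PySem.Dict.mk [('L','A'), ('V','A'), ('I','A'), ('M','A'), ('C','B'), ('A','C'), ('G','D'), ('S','E'), ('T','E'), ('P','F'), ('F','G'), ('Y','G'), ('W','G'), ('E','H'), ('D','H'), ('N','H'), ('Q','H'), ('K','I'), ('R','I'), ('H','J')] := by decide
  have u3 : pvtwelve = PySem.Dict.mk [('L','A'), ('V','A'), ('I','A'), ('M','A'), ('C','B'), ('A','C'), ('G','D'), ('S','E'), ('T','E'), ('P','F'), ('F','G'), ('Y','G'), ('W','H'), ('E','I'), ('Q','I'), ('D','J'), ('N','J'), ('K','K'), ('R','K'), ('H','L')] := by decide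
  have u4 : pvfifteen = PySem.Dict.mk [('L','A'), ('V','A'), ('I','A'), ('M','A'), ('C','B'), ('A','C'), ('G','D'), ('S','E'), ('T','F'), ('P','G'), ('F','H'), ('Y','H'), ('W','I'), ('E','J'), ('Q','K'), ('D','L'), ('N','M'), ('K','N'), ('R','N'), ('H','O')] := by decide
  have u5 : pveighteen = PySem.Dict.mk [('L','A'), ('M','A'), ('V','B'), ('I','B'), ('C','C'), ('A','D'), ('G','E'), ('S','F'), ('T','G'), ('P','H'), ('F','I'), ('Y','J'), ('W','K'), ('E','L'), ('D','M'), ('N','N'), ('Q','O'), ('K','P'), ('R','Q'), ('H','R')] := by decide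
  simp only [PySem.Dict.getD, t0, u0, u1, u2, u3, u4, u5]
  simp [PySem.Dict.get?,
    beq_eq_false_iff_ne.mpr (Ne.symm h1),
    beq_eq_false_iff_ne.mpr (Ne.symm h2),
    beq_eq_false_iff_ne.mpr (Ne.symm h3),
    beq_eq_false_iff_ne.mpr (Ne.symm h4),
    beq_eq_false_iff_ne.mpr (Ne.symm h5),
    beq_eq_false_iff_ne.mpr (Ne.symm h6),
    beq_eq_false_iff_ne.mpr (Ne.symm h7),
    beq_eq_false_iff_ne.mpr (Ne.symm h8),
    beq_eq_false_iff_ne.mpr (Ne.symm h9),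
    beq_eq_false_iff_ne.mpr (Ne.symm h10),
    beq_eq_false_iff_ne.mpr (Ne.symm h11),
    beq_eq_false_iff_ne.mpr (Ne.symm h12),
    beq_eq_false_iff_ne.mpr (Ne.symm h13),
    beq_eq_false_iff_ne.mpr (Ne.symm h14),
    beq_eq_false_iff_ne.mpr (Ne.symm h15),
    beq_eq_false_iff_ne.mpr (Ne.symm h16),
    beq_eq_false_iff_ne.mpr (Ne.symm h17),
    beq_eq_false_iff_ne.mpr (Ne.symm h18),
    beq_eq_false_iff_ne.mpr (Ne.symm h19),
    beq_eq_false_iff_ne.mpr (Ne.symm h20)]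

theorem pvAltLoop_eq (cs a1 a2 a3 a4 a5 a6 : List Char) :
    pvAltLoop cs a1 a2 a3 a4 a5 a6 =
      (String.ofList (a1.reverse ++ cs.map (fun c => PySem.Dict.getD pvfour c c)),
       String.ofList (a2.reverse ++ cs.map (fun c => PySem.Dict.getD pveight c c)),
       String.ofList (a3.reverse ++ cs.map (fun c => PySem.Dict.getD pvten c c)),
       String.ofList (a4.reverse ++ cs.map (fun c => PySem.Dict.getD pvtwelve c c)),
       String.ofList (a5.reverse ++ cs.map (fun c => PySem.Dict.getD pvfifteen c c)),
       String.ofList (a6.reverse ++ cs.map (fun c => PySem.Dict.getD pveighteen c c))) := by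
  induction cs generalizing a1 a2 a3 a4 a5 a6 with
  | nil => simp [pvAltLoop]
  | cons c rest ih =>
      simp only [pvAltLoop, pvTable_eq, ih, List.map_cons, List.reverse_cons, List.append_assoc,
        List.cons_append, List.nil_append]

-- ===== VERDICT (by name: the statement is the Claim_ definition above) =====
theorem reduce_alphabet_spec : Claim_equal_reduce_alphabet := by
  intro sequence _
  unfold Spec_reduce_alphabet reduce_alphabet reduce_alphabet_alt pvTranslate
  rw [pvAltLoop_eq]
  simp
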